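-- pv_equiv track=rewrite | github.com/imf4isal/DSA | recursion/easy/steps.py | helper
-- ===== SOURCE A (Python) =====
-- import math
--
-- def helper(n, c):
--     if n == 0:
--         return c
--     rem = n % 2
--     if rem == 0:
--         return helper(math.floor(n/2), c+1)
--     else:
--         return helper(n-1, c+1)
-- ===== SOURCE B (Python) =====
-- def helper(n, c):
--     # Closed form: for n > 0, the halve/decrement process takes
--     # (bit_length(n) - 1) halvings + bit_count(n) decrements.
--     if n == 0:
--         return c
--     return c + n.bit_length() - 1 + n.bit_count()
-- ===== Notes on version B (the rewrite author's own statement) =====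
-- stated objective: faster
-- what changed: Replaces the step-by-step halve/decrement recursion with the closed form c + bit_length(n) - 1 + bit_count(n).
import Mathlib
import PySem

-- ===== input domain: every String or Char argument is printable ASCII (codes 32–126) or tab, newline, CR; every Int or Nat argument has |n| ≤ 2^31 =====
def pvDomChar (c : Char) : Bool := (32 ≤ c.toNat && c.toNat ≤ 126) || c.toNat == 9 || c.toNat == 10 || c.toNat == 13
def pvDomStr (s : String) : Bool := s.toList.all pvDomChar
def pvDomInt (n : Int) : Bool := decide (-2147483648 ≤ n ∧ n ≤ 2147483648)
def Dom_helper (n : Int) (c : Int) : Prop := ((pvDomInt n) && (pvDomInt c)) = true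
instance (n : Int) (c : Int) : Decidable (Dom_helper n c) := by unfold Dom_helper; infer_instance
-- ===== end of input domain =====

-- ===== PORT A =====
-- math.floor(n/2) is exact integer floor division for |n| ≤ 2^31 (float-exact), ported as PySem.Int.floordiv.
-- The 'n < 0' branch is a totality guard only: Python A recurses forever there (excluded by Pre_helper).
def helper (n : Int) (c : Int) : Int :=
  if n = 0 then c
  else if n < 0 then 0
  else if PySem.Int.mod n 2 = 0 then helper (PySem.Int.floordiv n 2) (c + 1)
  else helper (n - 1) (c + 1)
termination_by n.toNat
decreasing_by
  · have h2 : PySem.Int.floordiv n 2 = n / 2 := PySem.Int.floordiv_eq_ediv_of_pos (by omega)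
    rw [h2]; omega
  · omega

-- ===== PORT B =====
def helper_alt (n : Int) (c : Int) : Int :=
  if n = 0 then c
  else c + (PySem.Int.bitLength n : Int) - 1 + (PySem.Int.bitCount n : Int)

-- ===== PRECONDITION & SPEC =====
-- Pre_: Python A returns only for n ≥ 0; for n < 0 it recurses forever (RecursionError).
def Pre_helper (n : Int) (c : Int) : Prop := 0 ≤ n
instance (n : Int) (c : Int) : Decidable (Pre_helper n c) := by unfold Pre_helper; infer_instance
def pvWitness_helper : Int × Int := (12, 0)

def Spec_helper (n : Int) (c : Int) (out : Int) : Prop := out = helper_alt n c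
instance (n : Int) (c : Int) (out : Int) : Decidable (Spec_helper n c out) := by unfold Spec_helper; infer_instance

-- ===== CLAIM (what is proved, stated in full; the proofs are below) =====
def Claim_equal_helper : Prop := ∀ (n : Int) (c : Int), Dom_helper n c → Pre_helper n c → Spec_helper n c (helper n c)

-- ===== LEMMAS AND PROOFS =====

lemma alt_step_even (m : Nat) (c : Int) (hm : 0 < m) (he : m % 2 = 0) :
    helper_alt ((m / 2 : Nat) : Int) (c + 1) = helper_alt (m : Int) c := by
  have hm2 : 0 < m / 2 := by omega
  unfold helper_alt
  rw [if_neg (by omega : ¬ ((m / 2 : Nat) : Int) = 0), if_neg (by omega : ¬ (m : Int) = 0)]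
  rw [PySem.Int.bitLength_natCast hm, PySem.Int.bitCount_natCast hm]
  push_cast
  omega

lemma alt_step_odd (m : Nat) (c : Int) (hm : 0 < m) (ho : m % 2 = 1) :
    helper_alt ((m - 1 : Nat) : Int) (c + 1) = helper_alt (m : Int) c := by
  unfold helper_alt
  rw [if_neg (by omega : ¬ (m : Int) = 0)]
  by_cases h1 : m = 1
  · subst h1
    rw [show ((1 - 1 : Nat) : Int) = 0 from by norm_num, if_pos rfl]
    rw [show PySem.Int.bitLength ((1 : Nat) : Int) = 1 from by decide,
        show PySem.Int.bitCount ((1 : Nat) : Int) = 1 from by decide]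
    push_cast
    ring
  · have hm1 : 0 < m - 1 := by omega
    rw [if_neg (by omega : ¬ ((m - 1 : Nat) : Int) = 0)]
    rw [PySem.Int.bitLength_natCast hm, PySem.Int.bitCount_natCast hm,
        PySem.Int.bitLength_natCast hm1, PySem.Int.bitCount_natCast hm1]
    have hd : (m - 1) / 2 = m / 2 := by omega
    rw [hd]
    push_cast
    omega

lemma helper_eq_alt (m : Nat) : ∀ c : Int, helper (m : Int) c = helper_alt (m : Int) c := by
  induction m using Nat.strong_induction_on with
  | _ m ih =>
    intro c
    unfold helper
    by_cases h0 : m = 0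
    · subst h0; simp [helper_alt]
    · have hm : 0 < m := Nat.pos_of_ne_zero h0
      rw [if_neg (by exact_mod_cast h0), if_neg (by omega : ¬ (m : Int) < 0)]
      by_cases he : m % 2 = 0
      · rw [if_pos (by have h := PySem.Int.mod_natCast m 2; rw [show ((2:Nat):Int) = 2 by norm_num] at h; rw [h, he]; rfl)]
        have hf := PySem.Int.floordiv_natCast m 2
        rw [show ((2:Nat):Int) = 2 by norm_num] at hf
        rw [hf]
        rw [ih (m / 2) (by omega)]
        exact alt_step_even m c hm he
      · have ho : m % 2 = 1 := by omega
        rw [if_neg (by have h := PySem.Int.mod_natCast m 2; rw [show ((2:Nat):Int) = 2 by norm_num] at h; rw [h, ho]; decide)]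
        rw [show (m : Int) - 1 = ((m - 1 : Nat) : Int) by omega]
        rw [ih (m - 1) (by omega)]
        exact alt_step_odd m c hm ho

-- ===== VERDICT (by name: the statement is the Claim_ definition above) =====
theorem helper_spec : Claim_equal_helper := by
  intro n c _ hpre
  replace hpre : 0 ≤ n := hpre
  unfold Spec_helper
  have hn : n = ((n.toNat : Nat) : Int) := by omega
  rw [hn]
  exact helper_eq_alt n.toNat c
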